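-- pv_equiv track=rewrite | github.com/Bradley-Webster/Plugins_BWebster | nuke/Python/Startup/Python Startup files/Nuke/MissingFrame.py | cleanUpList
-- ===== SOURCE A (Python) =====
-- def cleanUpList(missingFrames):
--     cleanMissingFrames = []
--     missingFramesNice = ""
--     dirtySize = 0
--     minV = 0
--     maxV = 0
--
--     dirtySize = len(missingFrames)
--
--     minV = missingFrames[0]
--     maxV = missingFrames[0]
--
--     for i in range(dirtySize):
--         if (missingFrames[i] == (maxV+1)):
--             #as long as the frames are in sequence, update the maxV value
--             maxV = missingFrames[i]
--         else:
--             #if not in sequence, set the values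
--             cleanMissingFrames.append(minV)
--             cleanMissingFrames.append(maxV)
--             minV = maxV = missingFrames[i];
--
--     if (i == (dirtySize-1)):
--         #write the values if the list is at the end
--         cleanMissingFrames.append(minV)
--         cleanMissingFrames.append(maxV)
--
--     for i in range(2,len(cleanMissingFrames),2):
--         # create the formated output of the frames in the window for the user to shorten the list
--         if(cleanMissingFrames[i] == cleanMissingFrames[i+1]):
--             missingFramesNice += (str)(cleanMissingFrames[i]) + ", "
--         else:
--             missingFramesNice += (str)(cleanMissingFrames[i]) + "-" + (str)(cleanMissingFrames[i+1]) + ", "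
--
--
--     return missingFramesNice
-- ===== SOURCE B (Python) =====
-- def cleanUpList(missingFrames):
--     # Walk the list with two indices, peeling off one maximal run of
--     # consecutive frames at a time and formatting it directly.
--     pieces = []
--     i, n = 0, len(missingFrames)
--     while i < n:
--         j = i + 1
--         while j < n and missingFrames[j] == missingFrames[j - 1] + 1:
--             j += 1
--         lo, hi = missingFrames[i], missingFrames[j - 1]
--         pieces.append(str(lo) if lo == hi else str(lo) + "-" + str(hi))
--         i = j
--     return "".join(p + ", " for p in pieces)
-- ===== Notes on version B (the rewrite author's own statement) =====
-- stated objective: simpler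
-- what changed: A makes two passes (a prev+1 state machine flushing min/max pairs into a flat intermediate list, then an indexed formatting loop that skips the spurious first pair); B walks the list once with two indices, peeling off each maximal consecutive run and formatting it directly, joining the pieces at the end.
import Mathlib
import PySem

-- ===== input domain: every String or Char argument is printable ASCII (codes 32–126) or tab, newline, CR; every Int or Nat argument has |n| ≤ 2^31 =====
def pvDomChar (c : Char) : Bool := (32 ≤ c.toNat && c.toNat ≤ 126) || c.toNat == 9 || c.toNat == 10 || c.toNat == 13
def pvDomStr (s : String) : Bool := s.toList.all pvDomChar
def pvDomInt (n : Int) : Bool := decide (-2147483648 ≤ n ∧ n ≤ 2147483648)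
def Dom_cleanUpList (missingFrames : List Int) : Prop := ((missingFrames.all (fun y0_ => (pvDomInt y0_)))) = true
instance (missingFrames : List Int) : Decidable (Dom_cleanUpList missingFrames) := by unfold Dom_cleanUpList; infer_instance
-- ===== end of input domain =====

-- B replaces A's two-pass scheme (flat pair list built with prev+1 break detection, then
-- a second indexed formatting loop that skips a spurious first pair) by a single
-- run-splitting pass that formats each maximal consecutive run directly (simpler).


-- ===== PORT A =====
-- body of A's first loop: extend the current run or flush (minV, maxV) into the flat list
def stepA (st : List Int × Int × Int) (v : Int) : List Int × Int × Int :=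
  if v = st.2.2 + 1 then (st.1, st.2.1, v) else (st.1 ++ [st.2.1, st.2.2], v, v)

-- body of A's second loop: format the pair at index i of cleanMissingFrames
def fmt2step (clean : List Int) (acc : String) (i : Int) : String :=
  let a := PySem.List.pyGetD clean i 0
  let b := PySem.List.pyGetD clean (i + 1) 0
  if a = b then acc ++ PySem.Int.toStr a ++ ", "
  else acc ++ PySem.Int.toStr a ++ "-" ++ PySem.Int.toStr b ++ ", "

def cleanUpList (missingFrames : List Int) : String :=
  let dirtySize : Int := missingFrames.length
  let minV : Int := PySem.List.pyGetD missingFrames 0 0   -- first element; raises IndexError on the empty list (excluded by Pre_)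
  let maxV : Int := minV
  -- for i in range(dirtySize): …
  let st := (PySem.List.pyRange 0 dirtySize 1).foldl
      (fun st i => stepA st (PySem.List.pyGetD missingFrames i 0)) ([], minV, maxV)
  -- 'if i == dirtySize-1': always true here since the loop ran (Pre_ excludes [],
  -- where Python already raised at the first-element access and i would be unbound)
  let clean := st.1 ++ [st.2.1, st.2.2]
  -- for i in range(2, len(cleanMissingFrames), 2): …
  (PySem.List.pyRange 2 (clean.length : Int) 2).foldl (fmt2step clean) ""

-- ===== PORT B =====
-- inner 'while j < n and missingFrames[j] == missingFrames[j-1] + 1': advance past one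
-- maximal consecutive run; returns the run's last element and the remaining suffix
def runSplit (prev : Int) : List Int → Int × List Int
  | [] => (prev, [])
  | y :: ys => if y = prev + 1 then runSplit y ys else (prev, y :: ys)

theorem runSplit_len_le (prev : Int) (xs : List Int) :
    (runSplit prev xs).2.length ≤ xs.length := by
  induction xs generalizing prev with
  | nil => simp [runSplit]
  | cons y ys ih =>
    simp only [runSplit]
    split
    · exact le_trans (ih y) (Nat.le_succ _)
    · simp

-- outer 'while i < n': one formatted piece per maximal run
def goB : List Int → List String
  | [] => []
  | x :: xs =>
    let r := runSplit x xs
    (if x = r.1 then PySem.Int.toStr x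
     else PySem.Int.toStr x ++ "-" ++ PySem.Int.toStr r.1) :: goB r.2
termination_by xs => xs.length
decreasing_by
  simp only [List.length_cons]
  exact Nat.lt_succ_of_le (runSplit_len_le x xs)

def cleanUpList_alt (missingFrames : List Int) : String :=
  String.join ((goB missingFrames).map (fun p => p ++ ", "))

-- ===== PRECONDITION & SPEC =====
-- Pre_ excludes only the empty list, on which A raises IndexError at its initial first-element access.
def Pre_cleanUpList (missingFrames : List Int) : Prop := missingFrames ≠ []
instance (missingFrames : List Int) : Decidable (Pre_cleanUpList missingFrames) := by
  unfold Pre_cleanUpList; infer_instance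
def pvWitness_cleanUpList : List Int := [1, 2, 3, 7]

def Spec_cleanUpList (missingFrames : List Int) (out : String) : Prop := out = cleanUpList_alt missingFrames
instance (missingFrames : List Int) (out : String) : Decidable (Spec_cleanUpList missingFrames out) := by unfold Spec_cleanUpList; infer_instance

-- ===== CLAIM (what is proved, stated in full; the proofs are below) =====
def Claim_equal_cleanUpList : Prop := ∀ (missingFrames : List Int), Dom_cleanUpList missingFrames → Pre_cleanUpList missingFrames → Spec_cleanUpList missingFrames (cleanUpList missingFrames)

-- ===== LEMMAS AND PROOFS =====

-- the pair list A's phase 1 effectively builds (including the final flush)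
def pairsA (mn mx : Int) : List Int → List (Int × Int)
  | [] => [(mn, mx)]
  | y :: ys => if y = mx + 1 then pairsA mn y ys else (mn, mx) :: pairsA y y ys

def flat2 (ps : List (Int × Int)) : List Int := ps.flatMap (fun p => [p.1, p.2])

-- A's phase-2 formatting of a pair list
def fmtPairs : List (Int × Int) → String
  | [] => ""
  | p :: ps =>
    (if p.1 = p.2 then PySem.Int.toStr p.1 ++ ", "
     else PySem.Int.toStr p.1 ++ "-" ++ PySem.Int.toStr p.2 ++ ", ") ++ fmtPairs ps

theorem join_cons_aux (l : List String) : ∀ (init : String),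
    l.foldl (· ++ ·) init = init ++ l.foldl (· ++ ·) "" := by
  induction l with
  | nil => intro init; simp [String.append_empty]
  | cons s l ih =>
    intro init
    simp only [List.foldl_cons]
    rw [ih (init ++ s), ih ("" ++ s), String.empty_append, String.append_assoc]

theorem join_cons (s : String) (l : List String) :
    String.join (s :: l) = s ++ String.join l := by
  simp only [String.join, List.foldl_cons]
  rw [join_cons_aux l ("" ++ s), String.empty_append]

theorem flat2_cons (p : Int × Int) (ps : List (Int × Int)) :
    flat2 (p :: ps) = p.1 :: p.2 :: flat2 ps := by
  simp [flat2]

theorem flat2_length (ps : List (Int × Int)) : (flat2 ps).length = 2 * ps.length := by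
  induction ps with
  | nil => simp [flat2]
  | cons p ps ih => rw [flat2_cons]; simp [ih]; ring

theorem flat2_getD_fst (ps : List (Int × Int)) : ∀ (k : Nat) (h : k < ps.length),
    (flat2 ps).getD (2 * k) 0 = (ps[k]'h).1 := by
  induction ps with
  | nil => intro k h; simp at h
  | cons p ps ih =>
    intro k h
    cases k with
    | zero => rw [flat2_cons]; simp
    | succ k =>
      rw [flat2_cons, show 2 * (k + 1) = 2 * k + 1 + 1 by ring,
          List.getD_cons_succ, List.getD_cons_succ]
      exact ih k (by simpa using h)

theorem flat2_getD_snd (ps : List (Int × Int)) : ∀ (k : Nat) (h : k < ps.length),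
    (flat2 ps).getD (2 * k + 1) 0 = (ps[k]'h).2 := by
  induction ps with
  | nil => intro k h; simp at h
  | cons p ps ih =>
    intro k h
    cases k with
    | zero => rw [flat2_cons]; simp
    | succ k =>
      rw [flat2_cons, show 2 * (k + 1) + 1 = (2 * k + 1) + 1 + 1 by ring,
          List.getD_cons_succ, List.getD_cons_succ]
      exact ih k (by simpa using h)

theorem pyRange_two_cons (a b : Int) (h : a < b) :
    PySem.List.pyRange a b 2 = a :: PySem.List.pyRange (a + 2) b 2 := by
  rw [PySem.List.pyRange_of_pos a b (by norm_num : (0:Int) < 2),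
      PySem.List.pyRange_of_pos (a+2) b (by norm_num : (0:Int) < 2)]
  simp only [if_pos h]
  by_cases h2 : a + 2 < b
  · simp only [if_pos h2]
    have hN : ((b - a + 2 - 1) / 2).toNat = ((b - (a+2) + 2 - 1) / 2).toNat + 1 := by
      omega
    rw [hN, List.range_succ_eq_map]
    simp only [List.map_cons, List.map_map, List.cons.injEq]
    refine ⟨by norm_num, List.map_congr_left ?_⟩
    intro k _
    simp only [Function.comp_apply, Nat.succ_eq_add_one]
    push_cast
    ring
  · simp only [if_neg h2]
    have hN : ((b - a + 2 - 1) / 2).toNat = 1 := by omega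
    rw [hN]
    norm_num [List.range_succ]

theorem pyRange_two_nil (a b : Int) (h : b ≤ a) : PySem.List.pyRange a b 2 = [] := by
  rw [PySem.List.pyRange_of_pos a b (by norm_num : (0:Int) < 2)]
  simp [not_lt_of_ge h]

theorem foldl_stepA (xs : List Int) : ∀ (acc : List Int) (mn mx : Int),
    (xs.foldl stepA (acc, mn, mx)).1
      ++ [(xs.foldl stepA (acc, mn, mx)).2.1, (xs.foldl stepA (acc, mn, mx)).2.2]
      = acc ++ flat2 (pairsA mn mx xs) := by
  induction xs with
  | nil => intro acc mn mx; simp [pairsA, flat2]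
  | cons y ys ih =>
    intro acc mn mx
    simp only [List.foldl_cons, stepA, pairsA]
    by_cases h : y = mx + 1
    · simp only [h]
      exact ih acc mn (mx + 1)
    · simp only [if_neg h]
      rw [ih (acc ++ [mn, mx]) y y, flat2_cons]
      simp

-- A's formatting loop over a flattened pair list = fmtPairs of the pairs from index k on
theorem phase2_eq (ps : List (Int × Int)) (d : Nat) : ∀ (k : Nat) (acc : String), k + d = ps.length →
    (PySem.List.pyRange ((2 * k : Nat) : Int) ((flat2 ps).length : Int) 2).foldl
        (fmt2step (flat2 ps)) acc
      = acc ++ fmtPairs (ps.drop k) := by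
  induction d with
  | zero =>
    intro k acc hk
    rw [pyRange_two_nil _ _ (by rw [flat2_length]; push_cast; omega)]
    rw [List.drop_eq_nil_of_le (by omega)]
    simp [fmtPairs, String.append_empty]
  | succ d ih =>
    intro k acc hk
    have hklt : k < ps.length := by omega
    rw [pyRange_two_cons _ _ (by rw [flat2_length]; push_cast; omega), List.foldl_cons]
    simp only [fmt2step]
    rw [show ((2 * k : Nat) : Int) + 1 = ((2 * k + 1 : Nat) : Int) by push_cast; ring,
        PySem.List.pyGetD_natCast, PySem.List.pyGetD_natCast,
        flat2_getD_fst ps k hklt, flat2_getD_snd ps k hklt,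
        show ((2 * k : Nat) : Int) + 2 = ((2 * (k + 1) : Nat) : Int) by push_cast; ring,
        ih (k + 1) _ (by omega),
        List.drop_eq_getElem_cons hklt]
    simp only [fmtPairs]
    by_cases hab : (ps[k]'hklt).1 = (ps[k]'hklt).2 <;>
      simp [hab, String.append_assoc]

theorem phase2_one (p : Int × Int) (ps : List (Int × Int)) :
    (PySem.List.pyRange 2 ((flat2 (p :: ps)).length : Int) 2).foldl
        (fmt2step (flat2 (p :: ps))) ""
      = fmtPairs ps := by
  have h := phase2_eq (p :: ps) ps.length 1 "" (by simp only [List.length_cons]; omega)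
  norm_num at h
  rw [h]

theorem portA_eq (x0 : Int) (rest : List Int) :
    cleanUpList (x0 :: rest) = fmtPairs (pairsA x0 x0 rest) := by
  simp only [cleanUpList, PySem.List.pyGetD_zero_cons]
  rw [PySem.List.foldl_pyRange_zero_pyGetD' (x0 :: rest) 0 stepA ([], x0, x0)]
  rw [foldl_stepA (x0 :: rest) [] x0 x0, List.nil_append]
  rw [show pairsA x0 x0 (x0 :: rest) = (x0, x0) :: pairsA x0 x0 rest from by
        simp only [pairsA]; rw [if_neg (by omega)]]
  exact phase2_one (x0, x0) (pairsA x0 x0 rest)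

theorem L2 (xs : List Int) : ∀ (mn mx : Int),
    fmtPairs (pairsA mn mx xs)
      = ((if mn = (runSplit mx xs).1 then PySem.Int.toStr mn
          else PySem.Int.toStr mn ++ "-" ++ PySem.Int.toStr (runSplit mx xs).1) ++ ", ")
        ++ String.join ((goB (runSplit mx xs).2).map (fun p => p ++ ", ")) := by
  induction xs with
  | nil =>
    intro mn mx
    simp only [runSplit, pairsA, fmtPairs, goB, List.map_nil, String.join, List.foldl_nil,
      String.append_empty]
    by_cases hab : mn = mx <;> simp [hab, String.append_assoc]
  | cons y ys ih =>
    intro mn mx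
    by_cases h : y = mx + 1
    · simp only [pairsA, runSplit, if_pos h]
      exact ih mn y
    · simp only [pairsA, runSplit, if_neg h, fmtPairs]
      rw [ih y y]
      rw [show goB (y :: ys)
            = ((if y = (runSplit y ys).1 then PySem.Int.toStr y
                else PySem.Int.toStr y ++ "-" ++ PySem.Int.toStr (runSplit y ys).1)
               :: goB (runSplit y ys).2) from by simp only [goB]]
      rw [List.map_cons, join_cons]
      by_cases hab : mn = mx <;> simp [hab, String.append_assoc]

theorem portB_eq (x0 : Int) (rest : List Int) :
    cleanUpList_alt (x0 :: rest)
      = ((if x0 = (runSplit x0 rest).1 then PySem.Int.toStr x0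
          else PySem.Int.toStr x0 ++ "-" ++ PySem.Int.toStr (runSplit x0 rest).1) ++ ", ")
        ++ String.join ((goB (runSplit x0 rest).2).map (fun p => p ++ ", ")) := by
  simp only [cleanUpList_alt]
  rw [show goB (x0 :: rest)
        = ((if x0 = (runSplit x0 rest).1 then PySem.Int.toStr x0
            else PySem.Int.toStr x0 ++ "-" ++ PySem.Int.toStr (runSplit x0 rest).1)
           :: goB (runSplit x0 rest).2) from by simp only [goB]]
  rw [List.map_cons, join_cons]

-- ===== VERDICT (by name: the statement is the Claim_ definition above) =====
theorem cleanUpList_spec : Claim_equal_cleanUpList := by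
  intro missingFrames _ hpre
  unfold Spec_cleanUpList
  match missingFrames with
  | [] => exact absurd rfl hpre
  | x0 :: rest => rw [portA_eq, portB_eq, L2]
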